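-- pv_equiv track=rewrite | github.com/KevinRapo/PPMS-data-analysis | merged_v1_MASTER.py | filterMeasurementIndices
-- ===== SOURCE A (Python) =====
-- def filterMeasurementIndices(unfiltered_indices):
--     """
--     Filters the measurement indices so that the longest consecutive list is the measurement.
--
--     Parameters
--     ----------
--     unfiltered_indices : LIST OF LIST OF INT
--         Nested list with unfiltered measurement data indices.
--
--     Returns
--     -------
--     filtered : LIST OF LIST OF INT
--         Nested list with filtered measurement data indices.
--
--     """
--     filtered = []
--
--     for unfiltered in unfiltered_indices:
--
--         consecutive_sequences = []
--         current_sequence = [unfiltered[0]]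
--
--         for i in range(1, len(unfiltered)):
--             if unfiltered[i] - unfiltered[i - 1] == 1:
--                 current_sequence.append(unfiltered[i])
--             else:
--                 if len(current_sequence) > 1:
--                     consecutive_sequences.append(current_sequence)
--                 current_sequence = [unfiltered[i]]
--
--         # Check if the last sequence is consecutive and has more than one element
--         if len(current_sequence) > 1:
--             consecutive_sequences.append(current_sequence)
--
--         longest_sequence = max(consecutive_sequences, key=len, default=[])
--         filtered.append(longest_sequence)
--
--     return filtered
-- ===== SOURCE B (Python) =====
-- def _runs(xs):
--     """Split xs into its maximal consecutive runs, in order."""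
--     runs = []
--     rest = xs
--     while rest:
--         run = [rest[0]]
--         rest = rest[1:]
--         while rest and rest[0] - run[-1] == 1:
--             run.append(rest[0])
--             rest = rest[1:]
--         runs.append(run)
--     return runs
--
--
-- def filterMeasurementIndices(unfiltered_indices):
--     return [max([r for r in _runs(xs) if len(r) > 1], key=len, default=[])
--             for xs in unfiltered_indices]
-- ===== Notes on version B (the rewrite author's own statement) =====
-- stated objective: alternative
-- what changed: Replaces A's index-driven run-accumulating state machine (current_sequence/consecutive_sequences updated per index) with a split-into-maximal-runs decomposition: first cut each list into its maximal consecutive runs, then filter runs of length > 1 and take the first longest.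
-- outside the precondition, e.g. on filterMeasurementIndices([[]]): A raises IndexError, B returns [[]]
-- crash fix: A raises IndexError (unfiltered[0]) whenever some inner list is empty; B returns an empty result list for that entry. — e.g. on filterMeasurementIndices([[]]): A raises IndexError, B returns [[]]
import Mathlib
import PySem

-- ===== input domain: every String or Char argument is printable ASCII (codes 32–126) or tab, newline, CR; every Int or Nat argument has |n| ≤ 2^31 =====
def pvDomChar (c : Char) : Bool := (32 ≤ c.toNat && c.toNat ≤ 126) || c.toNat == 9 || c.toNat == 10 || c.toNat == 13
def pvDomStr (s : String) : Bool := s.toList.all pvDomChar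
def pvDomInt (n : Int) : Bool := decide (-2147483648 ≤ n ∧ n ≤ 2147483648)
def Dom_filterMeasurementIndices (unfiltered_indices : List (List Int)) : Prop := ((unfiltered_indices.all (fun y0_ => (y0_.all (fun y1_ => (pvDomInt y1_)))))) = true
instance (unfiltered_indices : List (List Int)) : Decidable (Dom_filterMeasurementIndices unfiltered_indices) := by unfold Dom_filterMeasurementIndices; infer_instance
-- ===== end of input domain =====

-- B replaces A's index-loop state machine by a split-into-maximal-runs decomposition
-- (cut each list into maximal consecutive runs, keep runs longer than 1, take the first longest);
-- alternative objective, not claimed faster. On an empty inner list A raises IndexError while B returns an empty result list for that entry.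

-- ===== PORT A =====
-- one step of A's inner 'for i in range(1, len(unfiltered))' loop; state = (consecutive_sequences, current_sequence)
def pvStepA (xs : List Int) (st : List (List Int) × List Int) (i : Int) : List (List Int) × List Int :=
  if PySem.List.pyGetD xs i 0 - PySem.List.pyGetD xs (i - 1) 0 = 1 then
    (st.1, st.2 ++ [PySem.List.pyGetD xs i 0])
  else
    ((if 1 < st.2.length then st.1 ++ [st.2] else st.1), [PySem.List.pyGetD xs i 0])

-- A's loop body for ONE inner list
def pvInnerA (xs : List Int) : List Int :=
  match PySem.List.pyGet? xs 0 with
  | none => []  -- Python raises IndexError here (unfiltered[0]); excluded by Pre_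
  | some x0 =>
    let st := (PySem.List.pyRange 1 (xs.length : Int) 1).foldl (pvStepA xs) ([], [x0])
    let cs := if 1 < st.2.length then st.1 ++ [st.2] else st.1
    PySem.List.maxD cs List.length []

def filterMeasurementIndices (unfiltered_indices : List (List Int)) : List (List Int) :=
  unfiltered_indices.foldl (fun filtered u => filtered ++ [pvInnerA u]) []

-- ===== PORT B =====
-- inner 'while rest and rest[0] - run[-1] == 1' loop of _runs: extension of the current run, and the rest
def pvExtendRun (prev : Int) : List Int → List Int × List Int
  | [] => ([], [])
  | x :: t =>
    if x - prev = 1 then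
      let p := pvExtendRun x t
      (x :: p.1, p.2)
    else ([], x :: t)

theorem pvExtendRun_snd_length_le (prev : Int) (t : List Int) :
    (pvExtendRun prev t).2.length ≤ t.length := by
  induction t generalizing prev with
  | nil => simp [pvExtendRun]
  | cons x t ih =>
    simp only [pvExtendRun]
    split
    · exact le_trans (ih x) (Nat.le_succ _)
    · simp

-- outer 'while rest' loop of _runs: the maximal consecutive runs of xs, in order
def pvRuns : List Int → List (List Int)
  | [] => []
  | x :: t =>
    let p := pvExtendRun x t
    (x :: p.1) :: pvRuns p.2
termination_by xs => xs.length
decreasing_by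
  simpa using Nat.lt_succ_of_le (pvExtendRun_snd_length_le x t)

def filterMeasurementIndices_alt (unfiltered_indices : List (List Int)) : List (List Int) :=
  unfiltered_indices.map (fun xs =>
    PySem.List.maxD ((pvRuns xs).filter (fun r => decide (1 < r.length))) List.length [])

-- ===== PRECONDITION & SPEC =====
-- Pre_ excludes inputs containing an empty inner list, on which A's 'unfiltered[0]' raises IndexError.
def Pre_filterMeasurementIndices (unfiltered_indices : List (List Int)) : Prop :=
  ∀ xs ∈ unfiltered_indices, xs ≠ []
instance (unfiltered_indices : List (List Int)) : Decidable (Pre_filterMeasurementIndices unfiltered_indices) := by unfold Pre_filterMeasurementIndices; infer_instance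

def pvWitness_filterMeasurementIndices : List (List Int) := [[1, 2, 3, 7], [5, 9, 10]]

-- A raises IndexError whenever some inner list is empty; B returns an empty result list for that entry.
def Raises_filterMeasurementIndices (unfiltered_indices : List (List Int)) : Prop :=
  ∃ xs ∈ unfiltered_indices, xs = []
instance (unfiltered_indices : List (List Int)) : Decidable (Raises_filterMeasurementIndices unfiltered_indices) := by unfold Raises_filterMeasurementIndices; infer_instance

def pvRaiseWitness_filterMeasurementIndices : List (List Int) := [[]]
def pvRaiseWitnessOut_filterMeasurementIndices : List (List Int) := [[]]

def Spec_filterMeasurementIndices (unfiltered_indices : List (List Int)) (out : List (List Int)) : Prop := out = filterMeasurementIndices_alt unfiltered_indices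
instance (unfiltered_indices : List (List Int)) (out : List (List Int)) : Decidable (Spec_filterMeasurementIndices unfiltered_indices out) := by unfold Spec_filterMeasurementIndices; infer_instance

-- ===== CLAIM (what is proved, stated in full; the proofs are below) =====
def Claim_equal_filterMeasurementIndices : Prop := ∀ (unfiltered_indices : List (List Int)), Dom_filterMeasurementIndices unfiltered_indices → Pre_filterMeasurementIndices unfiltered_indices → Spec_filterMeasurementIndices unfiltered_indices (filterMeasurementIndices unfiltered_indices)

def Claim_raises_filterMeasurementIndices : Prop := (∀ (unfiltered_indices : List (List Int)), Dom_filterMeasurementIndices unfiltered_indices → Raises_filterMeasurementIndices unfiltered_indices → ¬ Pre_filterMeasurementIndices unfiltered_indices) ∧ (Dom_filterMeasurementIndices (pvRaiseWitness_filterMeasurementIndices) ∧ Raises_filterMeasurementIndices (pvRaiseWitness_filterMeasurementIndices) ∧ filterMeasurementIndices_alt (pvRaiseWitness_filterMeasurementIndices) = pvRaiseWitnessOut_filterMeasurementIndices)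

-- ===== LEMMAS AND PROOFS =====

-- the body of A's inner loop as a function of the two adjacent element VALUES
def pvStepF (st : List (List Int) × List Int) (p : Int × Int) : List (List Int) × List Int :=
  if p.2 - p.1 = 1 then
    (st.1, st.2 ++ [p.2])
  else
    ((if 1 < st.2.length then st.1 ++ [st.2] else st.1), [p.2])

-- an index loop 'for i in range(1, len(xs))' reading xs[i-1] and xs[i] is a fold over adjacent pairs
theorem foldl_adj_aux {σ : Type} (f : σ → Int → Int → σ) :
    ∀ (a : Int) (t : List Int) (init : σ),
      (List.range t.length).foldl
        (fun s k => f s ((a :: t).getD k 0) ((a :: t).getD (k + 1) 0)) init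
      = ((a :: t).zip t).foldl (fun s p => f s p.1 p.2) init := by
  intro a t
  induction t generalizing a with
  | nil => intro init; simp
  | cons b t ih =>
    intro init
    rw [List.length_cons, List.range_succ_eq_map]
    simp only [List.foldl_cons, List.foldl_map, List.getD_cons_zero, List.getD_cons_succ,
      List.zip_cons_cons]
    exact ih b (f init a b)

theorem foldl_adj {σ : Type} (f : σ → Int → Int → σ) (xs : List Int) (init : σ) :
    (PySem.List.pyRange 1 (xs.length : Int) 1).foldl
      (fun s i => f s (PySem.List.pyGetD xs (i - 1) 0) (PySem.List.pyGetD xs i 0)) init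
    = (xs.zip xs.tail).foldl (fun s p => f s p.1 p.2) init := by
  cases xs with
  | nil => simp [PySem.List.pyRange_one_eq_nil]
  | cons a t =>
    rw [PySem.List.pyRange_one]
    have hlen : (((a :: t).length : Int) - 1).toNat = t.length := by
      simp
    rw [hlen, List.foldl_map]
    rw [show (fun (s : σ) (k : Nat) => f s (PySem.List.pyGetD (a :: t) ((1 : Int) + k - 1) 0)
            (PySem.List.pyGetD (a :: t) ((1 : Int) + k) 0))
        = (fun (s : σ) (k : Nat) => f s ((a :: t).getD k 0) ((a :: t).getD (k + 1) 0)) from by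
      funext s k
      have h1 : (1 : Int) + k - 1 = (k : Int) := by omega
      have h2 : (1 : Int) + k = ((k + 1 : Nat) : Int) := by push_cast; omega
      rw [h1, h2, PySem.List.pyGetD_natCast, PySem.List.pyGetD_natCast]]
    simpa using foldl_adj_aux f a t init

-- A's finalisation step
def pvFinA (st : List (List Int) × List Int) : List (List Int) :=
  if 1 < st.2.length then st.1 ++ [st.2] else st.1

-- the heart: A's accumulator loop + finalisation computes the long runs of the remaining stream
theorem key_lemma :
    ∀ (t : List Int) (prev : Int) (cs : List (List Int)) (c : List Int),
      pvFinA (((prev :: t).zip t).foldl pvStepF (cs, c))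
      = cs ++ ((c ++ (pvExtendRun prev t).1) :: pvRuns (pvExtendRun prev t).2).filter
          (fun r => decide (1 < r.length)) := by
  intro t
  induction t with
  | nil =>
    intro prev cs c
    simp only [List.zip_nil_right, List.foldl_nil, pvExtendRun, pvRuns, pvFinA]
    by_cases h : 1 < c.length <;> simp [h]
  | cons x t ih =>
    intro prev cs c
    simp only [List.zip_cons_cons, List.foldl_cons]
    by_cases h : x - prev = 1
    · have hs : pvStepF (cs, c) (prev, x) = (cs, c ++ [x]) := by
        simp [pvStepF, h]
      rw [hs, ih x cs (c ++ [x])]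
      simp [pvExtendRun, h, List.append_assoc]
    · have hs : pvStepF (cs, c) (prev, x)
          = ((if 1 < c.length then cs ++ [c] else cs), [x]) := by
        simp [pvStepF, h]
      rw [hs, ih x _ [x]]
      have hruns : pvRuns (x :: t)
          = (x :: (pvExtendRun x t).1) :: pvRuns (pvExtendRun x t).2 := by
        rw [pvRuns]
      simp only [pvExtendRun, if_neg h, List.append_nil, hruns, List.filter_cons]
      by_cases hc : 1 < c.length <;> simp [hc, List.append_assoc]

theorem inner_eq (xs : List Int) (hxs : xs ≠ []) :
    pvInnerA xs
    = PySem.List.maxD ((pvRuns xs).filter (fun r => decide (1 < r.length))) List.length [] := by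
  cases xs with
  | nil => exact absurd rfl hxs
  | cons x0 t =>
    have hstep : pvStepA (x0 :: t)
        = fun st i => pvStepF st (PySem.List.pyGetD (x0 :: t) (i - 1) 0,
            PySem.List.pyGetD (x0 :: t) i 0) := by
      funext st i
      simp [pvStepA, pvStepF]
    simp only [pvInnerA, PySem.List.pyGet?_zero_cons, hstep]
    rw [foldl_adj (fun s a b => pvStepF s (a, b)) (x0 :: t) ([], [x0])]
    have := key_lemma t x0 [] [x0]
    simp only [List.tail_cons]
    rw [show (((x0 :: t).zip t).foldl (fun s p => pvStepF s (p.1, p.2)) ([], [x0]))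
        = (((x0 :: t).zip t).foldl pvStepF ([], [x0])) from by
      simp only [Prod.mk.eta]]
    have hfin : pvFinA (((x0 :: t).zip t).foldl pvStepF ([], [x0]))
        = (if 1 < (((x0 :: t).zip t).foldl pvStepF ([], [x0])).2.length
           then (((x0 :: t).zip t).foldl pvStepF ([], [x0])).1
             ++ [(((x0 :: t).zip t).foldl pvStepF ([], [x0])).2]
           else (((x0 :: t).zip t).foldl pvStepF ([], [x0])).1) := rfl
    rw [← hfin, this]
    have hruns : pvRuns (x0 :: t)
        = (x0 :: (pvExtendRun x0 t).1) :: pvRuns (pvExtendRun x0 t).2 := by rw [pvRuns]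
    simp [hruns]

-- ===== VERDICT (by name: the statement is the Claim_ definition above) =====
theorem filterMeasurementIndices_spec : Claim_equal_filterMeasurementIndices := by
  intro l _ hpre
  unfold Spec_filterMeasurementIndices filterMeasurementIndices filterMeasurementIndices_alt
  rw [PySem.List.foldl_append_singleton_eq_map]
  simp only [List.nil_append]
  exact List.map_congr_left (fun xs hx => inner_eq xs (hpre xs hx))

theorem filterMeasurementIndices_raises : Claim_raises_filterMeasurementIndices := by
  unfold Claim_raises_filterMeasurementIndices
  constructor
  · intro l _ ⟨xs, hmem, hnil⟩ hpre
    exact hpre xs hmem hnil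
  · exact ⟨by decide, ⟨[], by simp [pvRaiseWitness_filterMeasurementIndices]⟩, by simp [filterMeasurementIndices_alt, pvRaiseWitness_filterMeasurementIndices,
        pvRaiseWitnessOut_filterMeasurementIndices, pvRuns, PySem.List.maxD, PySem.List.max?]⟩

-- deliberate self-check: the raise-witness value recorded above really is B's output there
theorem pvRaiseWitness_ok :
    filterMeasurementIndices_alt pvRaiseWitness_filterMeasurementIndices
      = pvRaiseWitnessOut_filterMeasurementIndices :=
  filterMeasurementIndices_raises.2.2.2
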